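-- pv_equiv track=rewrite | github.com/be9em0t/HoudiniElf | tools_QGIS/OD_Filter_and_Sort.py | reorder_columns_order
-- ===== SOURCE A (Python) =====
-- from typing import Dict, List, Tuple
--
-- def reorder_columns_order(colnames: List[str]) -> List[str]:
-- 	"""Return column names sorted by the requested group order.
--
-- 	Group priorities:
-- 	  0 -> Trips (no trailing '2')
-- 	  1 -> Percent (no trailing '2')
-- 	  2 -> Trips2
-- 	  3 -> Percent2
-- 	  4 -> others
-- 	"""
-- 	# New ordering: put all non-Trips/Percent columns first, then
-- 	# Trips, Percent, Trips2, Percent2 (each group sorted by time suffix when present).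
--
-- 	def secondary(name: str) -> str:
-- 		# sort by the time part if present, otherwise by full name
-- 		# join all parts after the first so time like 0000_0400 is returned as a single key
-- 		parts = name.split("_")
-- 		return "_".join(parts[1:]) if len(parts) > 1 else name
--
-- 	others: List[str] = []
-- 	trips: List[str] = []
-- 	percent: List[str] = []
-- 	trips2: List[str] = []
-- 	percent2: List[str] = []
--
-- 	for name in colnames:
-- 		if name.startswith("Trips2"):
-- 			trips2.append(name)
-- 		elif name.startswith("Trips"):
-- 			trips.append(name)
-- 		elif name.startswith("Percent2"):
-- 			percent2.append(name)
-- 		elif name.startswith("Percent"):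
-- 			percent.append(name)
-- 		else:
-- 			others.append(name)
--
-- 	# sort each group by the secondary key (time part)
-- 	others = sorted(others, key=secondary)
-- 	trips = sorted(trips, key=secondary)
-- 	percent = sorted(percent, key=secondary)
-- 	trips2 = sorted(trips2, key=secondary)
-- 	percent2 = sorted(percent2, key=secondary)
--
-- 	# final order: others first, then trips, percent, trips2, percent2
-- 	return others + trips + percent + trips2 + percent2
-- ===== SOURCE B (Python) =====
-- from typing import List
--
-- def reorder_columns_order(colnames: List[str]) -> List[str]:
-- 	"""Single stable sort by (group priority, time-suffix key)."""
--
-- 	def priority(name: str) -> int: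
-- 		if name.startswith("Trips2"):
-- 			return 3
-- 		if name.startswith("Trips"):
-- 			return 1
-- 		if name.startswith("Percent2"):
-- 			return 4
-- 		if name.startswith("Percent"):
-- 			return 2
-- 		return 0
--
-- 	def secondary(name: str) -> str:
-- 		parts = name.split("_")
-- 		return "_".join(parts[1:]) if len(parts) > 1 else name
--
-- 	return sorted(colnames, key=lambda n: (priority(n), secondary(n)))
-- ===== Notes on version B (the rewrite author's own statement) =====
-- stated objective: simpler
-- what changed: Replaces A's five-way partition loop plus five separate per-group sorts and concatenation by a single stable sort of the whole list keyed by a (group-priority, secondary) tuple, the priority integer encoding the final group order.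
import Mathlib
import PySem

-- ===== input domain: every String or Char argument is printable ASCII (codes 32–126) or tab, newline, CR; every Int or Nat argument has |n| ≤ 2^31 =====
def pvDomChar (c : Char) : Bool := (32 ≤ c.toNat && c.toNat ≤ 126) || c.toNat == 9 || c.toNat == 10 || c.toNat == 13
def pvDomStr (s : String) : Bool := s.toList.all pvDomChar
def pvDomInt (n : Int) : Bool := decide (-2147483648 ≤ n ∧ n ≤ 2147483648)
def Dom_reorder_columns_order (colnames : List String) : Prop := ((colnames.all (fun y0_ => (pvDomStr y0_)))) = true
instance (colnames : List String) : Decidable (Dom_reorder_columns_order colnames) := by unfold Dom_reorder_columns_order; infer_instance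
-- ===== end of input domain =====

-- B replaces A's five-way partition + five sorts + concatenation by ONE stable sort with a
-- (group-priority, secondary) tuple key; objective: simpler (same asymptotic cost).


-- ===== PORT A =====
-- shared helper: Python's `secondary(name)` (identical in A and in B's source)
def pySecondary (name : String) : String :=
  let parts := (PySem.Str.split? name "_").getD []  -- sep "_" ≠ "", so split? is always `some`
  if parts.length > 1 then PySem.Str.join "_" (PySem.List.slice parts (some 1) none) else name

def reorder_columns_order (colnames : List String) : List String :=
  let groups := colnames.foldl (fun acc name =>
      if PySem.Str.startswith name "Trips2" then
        (acc.1, acc.2.1, acc.2.2.1, acc.2.2.2.1 ++ [name], acc.2.2.2.2)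
      else if PySem.Str.startswith name "Trips" then
        (acc.1, acc.2.1 ++ [name], acc.2.2.1, acc.2.2.2.1, acc.2.2.2.2)
      else if PySem.Str.startswith name "Percent2" then
        (acc.1, acc.2.1, acc.2.2.1, acc.2.2.2.1, acc.2.2.2.2 ++ [name])
      else if PySem.Str.startswith name "Percent" then
        (acc.1, acc.2.1, acc.2.2.1 ++ [name], acc.2.2.2.1, acc.2.2.2.2)
      else
        (acc.1 ++ [name], acc.2.1, acc.2.2.1, acc.2.2.2.1, acc.2.2.2.2))
    (([], [], [], [], []) : List String × List String × List String × List String × List String)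
  PySem.List.sorted groups.1 pySecondary false ++
  PySem.List.sorted groups.2.1 pySecondary false ++
  PySem.List.sorted groups.2.2.1 pySecondary false ++
  PySem.List.sorted groups.2.2.2.1 pySecondary false ++
  PySem.List.sorted groups.2.2.2.2 pySecondary false

-- ===== PORT B =====
-- B's `priority(name)`: the integer encoding the final group order
def pyPriority (name : String) : Nat :=
  if PySem.Str.startswith name "Trips2" then 3
  else if PySem.Str.startswith name "Trips" then 1
  else if PySem.Str.startswith name "Percent2" then 4
  else if PySem.Str.startswith name "Percent" then 2
  else 0

def reorder_columns_order_alt (colnames : List String) : List String :=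
  PySem.List.sorted2 colnames pyPriority pySecondary false

-- ===== PRECONDITION & SPEC =====
def Spec_reorder_columns_order (colnames : List String) (out : List String) : Prop := out = reorder_columns_order_alt colnames
instance (colnames : List String) (out : List String) : Decidable (Spec_reorder_columns_order colnames out) := by unfold Spec_reorder_columns_order; infer_instance

-- ===== CLAIM (what is proved, stated in full; the proofs are below) =====
def Claim_equal_reorder_columns_order : Prop := ∀ (colnames : List String), Dom_reorder_columns_order colnames → Spec_reorder_columns_order colnames (reorder_columns_order colnames)

-- ===== LEMMAS AND PROOFS =====

-- the i-th group of B's single sort: the names of priority i, sorted by the secondary key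
def pvGroup (xs : List String) (i : Nat) : List String :=
  PySem.List.sorted (xs.filter (fun n => pyPriority n == i)) pySecondary false

-- B's tuple-key `before` test of `sorted2`, named for the lemmas
def pvBefore (a b : String) : Bool :=
  decide (pyPriority a < pyPriority b) ||
    (!decide (pyPriority b < pyPriority a) && decide (pySecondary a < pySecondary b))

theorem pvInsertBy_append_left {α : Type} (before : α → α → Bool) (x : α) (A B : List α)
    (h : ∀ y ∈ A, before x y = false) :
    PySem.List.insertBy before x (A ++ B) = A ++ PySem.List.insertBy before x B := by
  induction A with
  | nil => simp
  | cons a A ih =>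
    have ha := h a (by simp)
    simp [PySem.List.insertBy, ha, ih (fun y hy => h y (by simp [hy]))]

theorem pvInsertBy_append_right {α : Type} (before : α → α → Bool) (x : α) (A B : List α)
    (h : ∀ y ∈ B, before x y = true) :
    PySem.List.insertBy before x (A ++ B) = PySem.List.insertBy before x A ++ B := by
  induction A with
  | nil =>
    cases B with
    | nil => simp
    | cons b B => simp [PySem.List.insertBy, h b (by simp)]
  | cons a A ih =>
    by_cases hx : before x a = true
    · simp [PySem.List.insertBy, hx]
    · simp [PySem.List.insertBy, hx, ih]

theorem pvInsertBy_congr {α : Type} (before before' : α → α → Bool) (x : α) (l : List α)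
    (h : ∀ y ∈ l, before x y = before' x y) :
    PySem.List.insertBy before x l = PySem.List.insertBy before' x l := by
  induction l with
  | nil => rfl
  | cons a l ih =>
    have ha := h a (by simp)
    by_cases hx : before x a = true
    · simp [PySem.List.insertBy, hx, ← ha]
    · simp [PySem.List.insertBy, hx, ← ha, ih (fun y hy => h y (by simp [hy]))]

theorem pvSorted_snoc {α κ : Type} [LT κ] [DecidableLT κ] (l : List α) (x : α) (key : α → κ) :
    PySem.List.sorted (l ++ [x]) key false =
      PySem.List.insertBy (fun a b => decide (key a < key b)) x (PySem.List.sorted l key false) := by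
  rw [PySem.List.sorted_eq_foldl_insertBy, PySem.List.sorted_eq_foldl_insertBy, List.foldl_append]
  rfl

theorem pvSorted2_snoc (l : List String) (x : String) :
    PySem.List.sorted2 (l ++ [x]) pyPriority pySecondary false =
      PySem.List.insertBy pvBefore x (PySem.List.sorted2 l pyPriority pySecondary false) := by
  unfold PySem.List.sorted2
  rw [List.foldl_append]
  rfl

theorem pvGroup_mem {xs : List String} {i : Nat} {y : String} (hy : y ∈ pvGroup xs i) :
    pyPriority y = i := by
  unfold pvGroup at hy
  rw [PySem.List.mem_sorted] at hy
  simpa using (List.mem_filter.mp hy).2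

theorem pvPriority_lt5 (n : String) : pyPriority n < 5 := by
  unfold pyPriority; split_ifs <;> omega

theorem pvBefore_of_lt {x y : String} (h : pyPriority y < pyPriority x) : pvBefore x y = false := by
  simp [pvBefore]; omega

theorem pvBefore_of_gt {x y : String} (h : pyPriority x < pyPriority y) : pvBefore x y = true := by
  simp [pvBefore]; omega

theorem pvBefore_of_eq {x y : String} (h : pyPriority x = pyPriority y) :
    pvBefore x y = decide (pySecondary x < pySecondary y) := by
  simp [pvBefore, h]

theorem pvInsert_mid (x : String) (A M B : List String)
    (hA : ∀ y ∈ A, pvBefore x y = false) (hM : ∀ y ∈ M, pyPriority y = pyPriority x)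
    (hB : ∀ y ∈ B, pvBefore x y = true) :
    PySem.List.insertBy pvBefore x (A ++ (M ++ B)) =
      A ++ (PySem.List.insertBy (fun a b => decide (pySecondary a < pySecondary b)) x M ++ B) := by
  rw [pvInsertBy_append_left _ _ _ _ hA, pvInsertBy_append_right _ _ _ _ hB,
      pvInsertBy_congr _ (fun a b => decide (pySecondary a < pySecondary b)) x M
        (fun y hy => pvBefore_of_eq (by rw [hM y hy]))]

theorem pvGroup_snoc_self (xs : List String) (x : String) :
    pvGroup (xs ++ [x]) (pyPriority x) =
      PySem.List.insertBy (fun a b => decide (pySecondary a < pySecondary b)) x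
        (pvGroup xs (pyPriority x)) := by
  unfold pvGroup
  rw [List.filter_append, show (([x]).filter (fun n => pyPriority n == pyPriority x)) = [x] by simp,
      pvSorted_snoc]

theorem pvGroup_snoc_other (xs : List String) (x : String) {i : Nat} (h : pyPriority x ≠ i) :
    pvGroup (xs ++ [x]) i = pvGroup xs i := by
  unfold pvGroup
  rw [List.filter_append, show (([x]).filter (fun n => pyPriority n == i)) = [] by simp [h]]
  simp

theorem pvSorted2_eq_groups (xs : List String) :
    PySem.List.sorted2 xs pyPriority pySecondary false =
      pvGroup xs 0 ++ (pvGroup xs 1 ++ (pvGroup xs 2 ++ (pvGroup xs 3 ++ pvGroup xs 4))) := by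
  induction xs using List.reverseRecOn with
  | nil => rfl
  | append_singleton xs x ih =>
    rw [pvSorted2_snoc, ih]
    have h5 := pvPriority_lt5 x
    have hlt : ∀ {i : Nat} (y : String), y ∈ pvGroup xs i → i < pyPriority x → pvBefore x y = false :=
      fun y hy hi => pvBefore_of_lt (by rw [pvGroup_mem hy]; exact hi)
    have hgt : ∀ {i : Nat} (y : String), y ∈ pvGroup xs i → pyPriority x < i → pvBefore x y = true :=
      fun y hy hi => pvBefore_of_gt (by rw [pvGroup_mem hy]; exact hi)
    interval_cases hpx : pyPriority x
    · have hself : pvGroup (xs ++ [x]) 0 =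
          PySem.List.insertBy (fun a b => decide (pySecondary a < pySecondary b)) x (pvGroup xs 0) := by
        rw [← hpx]; exact pvGroup_snoc_self xs x
      have hmid := pvInsert_mid x (([] : List String)) (pvGroup xs 0) (pvGroup xs 1 ++ (pvGroup xs 2 ++ (pvGroup xs 3 ++ (pvGroup xs 4))))
        (by intro y hy; simp at hy)
        (fun y hy => by rw [pvGroup_mem hy, hpx])
        (by intro y hy; simp only [List.mem_append] at hy; rcases hy with hy | hy | hy | hy <;> exact hgt y (by assumption) (by omega))
      rw [show pvGroup xs 0 ++ (pvGroup xs 1 ++ (pvGroup xs 2 ++ (pvGroup xs 3 ++ pvGroup xs 4)))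
            = (([] : List String)) ++ ((pvGroup xs 0) ++ (pvGroup xs 1 ++ (pvGroup xs 2 ++ (pvGroup xs 3 ++ (pvGroup xs 4))))) from by simp,
          hmid, pvGroup_snoc_other xs x (i := 1) (by omega), pvGroup_snoc_other xs x (i := 2) (by omega), pvGroup_snoc_other xs x (i := 3) (by omega), pvGroup_snoc_other xs x (i := 4) (by omega), hself]
      try simp
    · have hself : pvGroup (xs ++ [x]) 1 =
          PySem.List.insertBy (fun a b => decide (pySecondary a < pySecondary b)) x (pvGroup xs 1) := by
        rw [← hpx]; exact pvGroup_snoc_self xs x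
      have hmid := pvInsert_mid x (pvGroup xs 0) (pvGroup xs 1) (pvGroup xs 2 ++ (pvGroup xs 3 ++ (pvGroup xs 4)))
        (by intro y hy; exact hlt y hy (by omega))
        (fun y hy => by rw [pvGroup_mem hy, hpx])
        (by intro y hy; simp only [List.mem_append] at hy; rcases hy with hy | hy | hy <;> exact hgt y (by assumption) (by omega))
      rw [show pvGroup xs 0 ++ (pvGroup xs 1 ++ (pvGroup xs 2 ++ (pvGroup xs 3 ++ pvGroup xs 4)))
            = (pvGroup xs 0) ++ ((pvGroup xs 1) ++ (pvGroup xs 2 ++ (pvGroup xs 3 ++ (pvGroup xs 4)))) from by simp,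
          hmid, pvGroup_snoc_other xs x (i := 0) (by omega), pvGroup_snoc_other xs x (i := 2) (by omega), pvGroup_snoc_other xs x (i := 3) (by omega), pvGroup_snoc_other xs x (i := 4) (by omega), hself]
      try simp [List.append_assoc]
    · have hself : pvGroup (xs ++ [x]) 2 =
          PySem.List.insertBy (fun a b => decide (pySecondary a < pySecondary b)) x (pvGroup xs 2) := by
        rw [← hpx]; exact pvGroup_snoc_self xs x
      have hmid := pvInsert_mid x (pvGroup xs 0 ++ (pvGroup xs 1)) (pvGroup xs 2) (pvGroup xs 3 ++ (pvGroup xs 4))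
        (by intro y hy; simp only [List.mem_append] at hy; rcases hy with hy | hy <;> exact hlt y (by assumption) (by omega))
        (fun y hy => by rw [pvGroup_mem hy, hpx])
        (by intro y hy; simp only [List.mem_append] at hy; rcases hy with hy | hy <;> exact hgt y (by assumption) (by omega))
      rw [show pvGroup xs 0 ++ (pvGroup xs 1 ++ (pvGroup xs 2 ++ (pvGroup xs 3 ++ pvGroup xs 4)))
            = (pvGroup xs 0 ++ (pvGroup xs 1)) ++ ((pvGroup xs 2) ++ (pvGroup xs 3 ++ (pvGroup xs 4))) from by simp,
          hmid, pvGroup_snoc_other xs x (i := 0) (by omega), pvGroup_snoc_other xs x (i := 1) (by omega), pvGroup_snoc_other xs x (i := 3) (by omega), pvGroup_snoc_other xs x (i := 4) (by omega), hself]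
      try simp [List.append_assoc]
    · have hself : pvGroup (xs ++ [x]) 3 =
          PySem.List.insertBy (fun a b => decide (pySecondary a < pySecondary b)) x (pvGroup xs 3) := by
        rw [← hpx]; exact pvGroup_snoc_self xs x
      have hmid := pvInsert_mid x (pvGroup xs 0 ++ (pvGroup xs 1 ++ (pvGroup xs 2))) (pvGroup xs 3) (pvGroup xs 4)
        (by intro y hy; simp only [List.mem_append] at hy; rcases hy with hy | hy | hy <;> exact hlt y (by assumption) (by omega))
        (fun y hy => by rw [pvGroup_mem hy, hpx])
        (by intro y hy; exact hgt y hy (by omega))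
      rw [show pvGroup xs 0 ++ (pvGroup xs 1 ++ (pvGroup xs 2 ++ (pvGroup xs 3 ++ pvGroup xs 4)))
            = (pvGroup xs 0 ++ (pvGroup xs 1 ++ (pvGroup xs 2))) ++ ((pvGroup xs 3) ++ (pvGroup xs 4)) from by simp,
          hmid, pvGroup_snoc_other xs x (i := 0) (by omega), pvGroup_snoc_other xs x (i := 1) (by omega), pvGroup_snoc_other xs x (i := 2) (by omega), pvGroup_snoc_other xs x (i := 4) (by omega), hself]
      try simp [List.append_assoc]
    · have hself : pvGroup (xs ++ [x]) 4 =
          PySem.List.insertBy (fun a b => decide (pySecondary a < pySecondary b)) x (pvGroup xs 4) := by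
        rw [← hpx]; exact pvGroup_snoc_self xs x
      have hmid := pvInsert_mid x (pvGroup xs 0 ++ (pvGroup xs 1 ++ (pvGroup xs 2 ++ (pvGroup xs 3)))) (pvGroup xs 4) (([] : List String))
        (by intro y hy; simp only [List.mem_append] at hy; rcases hy with hy | hy | hy | hy <;> exact hlt y (by assumption) (by omega))
        (fun y hy => by rw [pvGroup_mem hy, hpx])
        (by intro y hy; simp at hy)
      rw [show pvGroup xs 0 ++ (pvGroup xs 1 ++ (pvGroup xs 2 ++ (pvGroup xs 3 ++ pvGroup xs 4)))
            = (pvGroup xs 0 ++ (pvGroup xs 1 ++ (pvGroup xs 2 ++ (pvGroup xs 3)))) ++ ((pvGroup xs 4) ++ (([] : List String))) from by simp,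
          hmid, pvGroup_snoc_other xs x (i := 0) (by omega), pvGroup_snoc_other xs x (i := 1) (by omega), pvGroup_snoc_other xs x (i := 2) (by omega), pvGroup_snoc_other xs x (i := 3) (by omega), hself]
      try simp [List.append_assoc]

set_option maxHeartbeats 1000000 in
theorem pvLoopA_eq (xs : List String) (o t p t2 p2 : List String) :
    xs.foldl (fun acc name =>
      if PySem.Str.startswith name "Trips2" then
        (acc.1, acc.2.1, acc.2.2.1, acc.2.2.2.1 ++ [name], acc.2.2.2.2)
      else if PySem.Str.startswith name "Trips" then
        (acc.1, acc.2.1 ++ [name], acc.2.2.1, acc.2.2.2.1, acc.2.2.2.2)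
      else if PySem.Str.startswith name "Percent2" then
        (acc.1, acc.2.1, acc.2.2.1, acc.2.2.2.1, acc.2.2.2.2 ++ [name])
      else if PySem.Str.startswith name "Percent" then
        (acc.1, acc.2.1, acc.2.2.1 ++ [name], acc.2.2.2.1, acc.2.2.2.2)
      else
        (acc.1 ++ [name], acc.2.1, acc.2.2.1, acc.2.2.2.1, acc.2.2.2.2)) (o, t, p, t2, p2)
    = (o ++ xs.filter (fun n => pyPriority n == 0),
       t ++ xs.filter (fun n => pyPriority n == 1),
       p ++ xs.filter (fun n => pyPriority n == 2),
       t2 ++ xs.filter (fun n => pyPriority n == 3),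
       p2 ++ xs.filter (fun n => pyPriority n == 4)) := by
  induction xs generalizing o t p t2 p2 with
  | nil => simp
  | cons n xs ih =>
    simp only [List.foldl_cons]
    split_ifs with h1 h2 h3 h4
    · have hp : pyPriority n = 3 := by unfold pyPriority; rw [if_pos h1]
      rw [ih]; simp [hp, List.append_assoc]
    · have hp : pyPriority n = 1 := by unfold pyPriority; rw [if_neg h1, if_pos h2]
      rw [ih]; simp [hp, List.append_assoc]
    · have hp : pyPriority n = 4 := by unfold pyPriority; rw [if_neg h1, if_neg h2, if_pos h3]
      rw [ih]; simp [hp, List.append_assoc]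
    · have hp : pyPriority n = 2 := by unfold pyPriority; rw [if_neg h1, if_neg h2, if_neg h3, if_pos h4]
      rw [ih]; simp [hp, List.append_assoc]
    · have hp : pyPriority n = 0 := by unfold pyPriority; rw [if_neg h1, if_neg h2, if_neg h3, if_neg h4]
      rw [ih]; simp [hp, List.append_assoc]

-- ===== VERDICT (by name: the statement is the Claim_ definition above) =====
theorem reorder_columns_order_spec : Claim_equal_reorder_columns_order := by
  intro colnames _
  unfold Spec_reorder_columns_order reorder_columns_order reorder_columns_order_alt
  rw [pvSorted2_eq_groups, pvLoopA_eq]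
  simp [pvGroup]
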